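-- pv_equiv track=rewrite | github.com/GaryZLi/search-engine | functions(old).py | parse
-- ===== SOURCE A (Python) =====
-- def parse(text):
--     tokens = []
--     length = len(text)
--     char = 0
--
--     while char < length:
--         if text[char] == '<':
--             while char < length and text[char] != '>':
--                 char += 1
--         else:
--             while char < length and text[char] == ' ':
--                char += 1
--
--             start = char
--
--             #                          0 - 9                                              A-Z                                                a-z
--             while char < length and ( (ord(text[char]) > 47 and ord(text[char]) < 58) or (ord(text[char]) > 64 and ord(text[char]) < 91) or (ord(text[char]) > 96 and ord(text[char]) < 123) ):
--                 char += 1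
--
--             temp = text[start:char]
--             if len(temp) > 0:
--                 tokens.append(temp)
--
--             if char < length and text[char] != '<':
--                 char += 1
--
--     return tokens
-- ===== SOURCE B (Python) =====
-- def parse(text):
--     tokens = []
--     cur = []
--     in_tag = False
--     for c in text:
--         if in_tag:
--             if c == '>':
--                 in_tag = False
--         elif c == '<':
--             if cur:
--                 tokens.append(''.join(cur))
--                 cur = []
--             in_tag = True
--         elif '0' <= c <= '9' or 'A' <= c <= 'Z' or 'a' <= c <= 'z':
--             cur.append(c)
--         else:
--             if cur:
--                 tokens.append(''.join(cur))
--                 cur = []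
--     if cur:
--         tokens.append(''.join(cur))
--     return tokens
-- ===== Notes on version B (the rewrite author's own statement) =====
-- stated objective: alternative
-- what changed: Replaced A's index-based scanner (outer while with three nested inner while loops, per-char ord() range tests and string slicing) by a single left-to-right for-loop over the characters driven by an explicit (in_tag, current-word) state machine that builds tokens incrementally.
import Mathlib
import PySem

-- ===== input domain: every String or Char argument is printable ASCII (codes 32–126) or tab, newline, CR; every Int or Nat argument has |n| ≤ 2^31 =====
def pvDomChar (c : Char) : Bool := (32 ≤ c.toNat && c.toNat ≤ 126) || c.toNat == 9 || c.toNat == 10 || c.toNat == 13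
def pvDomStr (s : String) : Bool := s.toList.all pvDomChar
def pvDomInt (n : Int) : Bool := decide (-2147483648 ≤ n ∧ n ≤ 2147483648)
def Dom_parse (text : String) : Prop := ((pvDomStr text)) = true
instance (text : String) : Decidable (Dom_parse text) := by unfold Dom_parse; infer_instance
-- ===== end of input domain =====

-- B replaces A's index-based scanner (nested while loops plus slicing) by a single
-- left-to-right fold over the characters with an explicit (in_tag, current word) state;
-- objective: alternative (same linear cost, different traversal structure).

-- ===== PORT A =====
-- A's alnum test: 47 < ord(c) < 58 or 64 < ord(c) < 91 or 96 < ord(c) < 123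
def pvWildA (c : Char) : Bool :=
  (47 < c.toNat && c.toNat < 58) || (64 < c.toNat && c.toNat < 91) || (96 < c.toNat && c.toNat < 123)

-- inner while: while char < length and text[char] != '>': char += 1
def pvSkipTag : List Char → List Char
  | [] => []
  | c :: cs => if c = '>' then c :: cs else pvSkipTag cs

-- inner while: while char < length and text[char] == ' ': char += 1
def pvSkipSpaces : List Char → List Char
  | [] => []
  | c :: cs => if c = ' ' then pvSkipSpaces cs else c :: cs

-- inner while collecting the alnum run; .1 is temp = text[start:char], .2 the rest
def pvTakeWord : List Char → List Char × List Char
  | [] => ([], [])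
  | c :: cs =>
    if pvWildA c then
      let p := pvTakeWord cs
      (c :: p.1, p.2)
    else ([], c :: cs)

-- length facts cited by the termination proof of the outer loop
theorem pvSkipTag_len : ∀ l : List Char, (pvSkipTag l).length ≤ l.length := by
  intro l; induction l with
  | nil => simp [pvSkipTag]
  | cons c cs ih => simp only [pvSkipTag]; split <;> simp <;> omega

theorem pvSkipSpaces_len : ∀ l : List Char, (pvSkipSpaces l).length ≤ l.length := by
  intro l; induction l with
  | nil => simp [pvSkipSpaces]
  | cons c cs ih => simp only [pvSkipSpaces]; split <;> simp <;> omega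

theorem pvTakeWord_len : ∀ l : List Char, (pvTakeWord l).1.length + (pvTakeWord l).2.length = l.length := by
  intro l; induction l with
  | nil => simp [pvTakeWord]
  | cons c cs ih => simp only [pvTakeWord]; split <;> simp <;> omega

theorem pvWordDec (c : Char) (cs ds : List Char) (hc : ¬ c = '<')
    (hr : (pvTakeWord (pvSkipSpaces (c :: cs))).2 = '<' :: ds) : ds.length < cs.length := by
  have h2 := pvTakeWord_len (pvSkipSpaces (c :: cs))
  by_cases hsp : c = ' '
  · have h1 : pvSkipSpaces (c :: cs) = pvSkipSpaces cs := by simp [pvSkipSpaces, hsp]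
    rw [h1] at h2 hr
    have h3 := pvSkipSpaces_len cs
    have h4 := congrArg List.length hr
    simp at h4
    omega
  · have h1 : pvSkipSpaces (c :: cs) = c :: cs := by simp [pvSkipSpaces, hsp]
    rw [h1] at h2 hr
    by_cases hw : pvWildA c
    · have he : pvTakeWord (c :: cs) = (c :: (pvTakeWord cs).1, (pvTakeWord cs).2) := by
        simp [pvTakeWord, hw]
      rw [he] at hr h2
      have h3 := pvTakeWord_len cs
      have h4 := congrArg List.length hr
      simp at h2 h4
      omega
    · have he : pvTakeWord (c :: cs) = ([], c :: cs) := by simp [pvTakeWord, hw]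
      rw [he] at hr
      exact absurd (List.cons.injEq .. ▸ hr).1 hc

-- the outer while loop of A
def pvParseA : List Char → List String
  | [] => []
  | c :: cs =>
    if hc : c = '<' then
      pvParseA (pvSkipTag cs)
    else
      let w := (pvTakeWord (pvSkipSpaces (c :: cs))).1
      let toks := if w.length > 0 then [String.mk w] else []
      match hr : (pvTakeWord (pvSkipSpaces (c :: cs))).2 with
      | [] => toks
      | d :: ds =>
        if hd : d = '<' then toks ++ pvParseA (d :: ds)
        else toks ++ pvParseA ds
  termination_by l => l.length
  decreasing_by
  · have := pvSkipTag_len cs; simp; omega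
  · subst hd; have := pvWordDec c cs ds hc hr; simp; omega
  · have h2 := pvTakeWord_len (pvSkipSpaces (c :: cs))
    have h1 := pvSkipSpaces_len (c :: cs)
    have h4 := congrArg List.length hr
    simp at h1 h4 ⊢
    omega

def parse (text : String) : List String := pvParseA text.toList

-- ===== PORT B =====
-- B's alnum test: '0' <= c <= '9' or 'A' <= c <= 'Z' or 'a' <= c <= 'z'
def pvAlnumB (c : Char) : Bool :=
  ('0'.toNat ≤ c.toNat && c.toNat ≤ '9'.toNat) || ('A'.toNat ≤ c.toNat && c.toNat ≤ 'Z'.toNat)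
    || ('a'.toNat ≤ c.toNat && c.toNat ≤ 'z'.toNat)

-- "if cur: tokens.append(''.join(cur))"
def pvFlush (cur : List Char) (toks : List String) : List String :=
  if cur.isEmpty then toks else toks ++ [String.mk cur]

-- one step of B's for-loop on the state (in_tag, cur, tokens)
def pvStepB (st : Bool × List Char × List String) (c : Char) : Bool × List Char × List String :=
  match st with
  | (true, cur, toks) => if c = '>' then (false, cur, toks) else (true, cur, toks)
  | (false, cur, toks) =>
    if c = '<' then (true, [], pvFlush cur toks)
    else if pvAlnumB c then (false, cur ++ [c], toks)
    else (false, [], pvFlush cur toks)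

def parse_alt (text : String) : List String :=
  let st := text.toList.foldl pvStepB (false, [], [])
  pvFlush st.2.1 st.2.2

-- ===== PRECONDITION & SPEC =====
def Spec_parse (text : String) (out : List String) : Prop := out = parse_alt text
instance (text : String) (out : List String) : Decidable (Spec_parse text out) := by unfold Spec_parse; infer_instance

-- ===== CLAIM (what is proved, stated in full; the proofs are below) =====
def Claim_equal_parse : Prop := ∀ (text : String), Dom_parse text → Spec_parse text (parse text)

-- ===== LEMMAS AND PROOFS =====
def pvFinishB (st : Bool × List Char × List String) : List String := pvFlush st.2.1 st.2.2

theorem pvAlnumB_eq (c : Char) : pvAlnumB c = pvWildA c := by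
  simp only [pvAlnumB, pvWildA]
  rw [show '0'.toNat = 48 from rfl, show '9'.toNat = 57 from rfl, show 'A'.toNat = 65 from rfl,
      show 'Z'.toNat = 90 from rfl, show 'a'.toNat = 97 from rfl, show 'z'.toNat = 122 from rfl]
  rw [Bool.eq_iff_iff]
  simp only [Bool.or_eq_true, Bool.and_eq_true, decide_eq_true_eq]
  omega

theorem pvWildA_ne_lt (c : Char) (h : pvWildA c = true) : c ≠ '<' := by
  intro hc; subst hc; exact absurd h (by decide)

theorem pvFlush_eq (cur : List Char) (toks : List String) :
    pvFlush cur toks = toks ++ (if cur.length > 0 then [String.mk cur] else []) := by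
  simp only [pvFlush, List.isEmpty_iff]
  split
  · simp_all
  · split
    · rfl
    · simp_all

theorem pvParseA_lt (c : Char) (cs : List Char) (hc : c = '<') :
    pvParseA (c :: cs) = pvParseA (pvSkipTag cs) := by
  rw [pvParseA, dif_pos hc]

theorem pvParseA_cons (c : Char) (cs : List Char) (hc : ¬ c = '<') :
    pvParseA (c :: cs) =
      (if (pvTakeWord (pvSkipSpaces (c :: cs))).1.length > 0
        then [String.mk (pvTakeWord (pvSkipSpaces (c :: cs))).1] else []) ++
      (match (pvTakeWord (pvSkipSpaces (c :: cs))).2 with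
       | [] => []
       | d :: ds => if d = '<' then pvParseA (pvSkipTag ds) else pvParseA ds) := by
  rw [pvParseA]
  simp only [dif_neg hc]
  split
  · rename_i heq
    simp only [heq]
    simp
  · rename_i d ds heq
    simp only [heq]
    split
    · rename_i hd
      rw [pvParseA_lt d ds hd]
    · simp

theorem pvStepB_space (toks : List String) : pvStepB (false, [], toks) ' ' = (false, [], toks) := by
  simp [pvStepB, pvAlnumB, pvFlush]

theorem pvFoldB_spaces (l : List Char) (toks : List String) :
    (pvSkipSpaces l).foldl pvStepB (false, [], toks) = l.foldl pvStepB (false, [], toks) := by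
  induction l with
  | nil => rfl
  | cons c cs ih =>
    by_cases hc : c = ' '
    · subst hc
      simp only [pvSkipSpaces, List.foldl_cons, pvStepB_space]
      simpa using ih
    · simp [pvSkipSpaces, hc]

theorem pvFoldB_word (l : List Char) (cur : List Char) (toks : List String) :
    l.foldl pvStepB (false, cur, toks)
      = (pvTakeWord l).2.foldl pvStepB (false, cur ++ (pvTakeWord l).1, toks) := by
  induction l generalizing cur with
  | nil => simp [pvTakeWord]
  | cons c cs ih =>
    by_cases hw : pvWildA c
    · have hne : ¬ c = '<' := pvWildA_ne_lt c hw
      have hstep : pvStepB (false, cur, toks) c = (false, cur ++ [c], toks) := by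
        simp [pvStepB, hne, pvAlnumB_eq, hw]
      simp only [pvTakeWord, if_pos hw, List.foldl_cons, hstep]
      rw [ih]
      simp
    · simp [pvTakeWord, hw]

theorem pvTakeWord_stop (l : List Char) (d : Char) (ds : List Char)
    (hr : (pvTakeWord l).2 = d :: ds) : pvWildA d = false := by
  induction l with
  | nil => simp [pvTakeWord] at hr
  | cons c cs ih =>
    by_cases hw : pvWildA c
    · simp only [pvTakeWord, if_pos hw] at hr; exact ih hr
    · simp only [pvTakeWord, if_neg hw] at hr
      injection hr with h1 h2
      rw [← h1]
      simpa using hw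

theorem pvFoldB_tag (cs : List Char) (toks : List String)
    (H : ∀ ds : List Char, ds.length < cs.length →
      ∀ t, pvFinishB (ds.foldl pvStepB (false, [], t)) = t ++ pvParseA ds) :
    pvFinishB (cs.foldl pvStepB (true, [], toks)) = toks ++ pvParseA (pvSkipTag cs) := by
  induction cs with
  | nil => simp [pvFinishB, pvFlush, pvSkipTag, pvParseA]
  | cons c cs ih =>
    by_cases hc : c = '>'
    · subst hc
      have hstep : pvStepB (true, [], toks) '>' = (false, [], toks) := by simp [pvStepB]
      have hP : pvParseA ('>' :: cs) = pvParseA cs := by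
        rw [pvParseA_cons '>' cs (by decide)]
        have h1 : pvSkipSpaces ('>' :: cs) = '>' :: cs := by simp [pvSkipSpaces]
        have h2 : pvTakeWord ('>' :: cs) = ([], '>' :: cs) := by
          simp [pvTakeWord, pvWildA]
        rw [h1, h2]
        simp
      rw [show pvSkipTag ('>' :: cs) = '>' :: cs from by simp [pvSkipTag], hP,
        List.foldl_cons, hstep]
      exact H cs (by simp) toks
    · have hstep : pvStepB (true, [], toks) c = (true, [], toks) := by simp [pvStepB, hc]
      simp only [pvSkipTag, if_neg hc, List.foldl_cons, hstep]
      exact ih (fun ds hds t => H ds (by simp only [List.length_cons]; omega) t)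

theorem pvMain : ∀ (n : Nat) (l : List Char), l.length ≤ n →
    ∀ toks, pvFinishB (l.foldl pvStepB (false, [], toks)) = toks ++ pvParseA l := by
  intro n
  induction n with
  | zero =>
    intro l hl toks
    have : l = [] := List.eq_nil_of_length_eq_zero (by omega)
    subst this
    simp [pvFinishB, pvFlush, pvParseA]
  | succ n ih =>
    intro l hl toks
    cases l with
    | nil => simp [pvFinishB, pvFlush, pvParseA]
    | cons c cs =>
      simp only [List.length_cons] at hl
      by_cases hc : c = '<'
      · subst hc
        have hstep : pvStepB (false, [], toks) '<' = (true, [], toks) := by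
          simp [pvStepB, pvFlush]
        rw [List.foldl_cons, hstep, pvParseA_lt '<' cs rfl]
        exact pvFoldB_tag cs toks (fun ds hds t => ih ds (by omega) t)
      · have h1 := pvSkipSpaces_len (c :: cs)
        have h2 := pvTakeWord_len (pvSkipSpaces (c :: cs))
        simp only [List.length_cons] at h1
        rw [← pvFoldB_spaces (c :: cs) toks, pvFoldB_word (pvSkipSpaces (c :: cs)) [] toks]
        simp only [List.nil_append]
        rw [pvParseA_cons c cs hc]
        set w := (pvTakeWord (pvSkipSpaces (c :: cs))).1 with hw
        cases hr : (pvTakeWord (pvSkipSpaces (c :: cs))).2 with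
        | nil =>
          simp only [List.foldl_nil, pvFinishB]
          rw [pvFlush_eq]
          simp
        | cons d ds =>
          have hd_len : ds.length ≤ cs.length := by
            have h4 := congrArg List.length hr
            simp only [List.length_cons] at h4
            omega
          have hdw : pvWildA d = false := pvTakeWord_stop _ d ds hr
          by_cases hd : d = '<'
          · subst hd
            have hstep : pvStepB (false, w, toks) '<' = (true, [], pvFlush w toks) := by
              simp [pvStepB]
            rw [List.foldl_cons, hstep]
            rw [pvFoldB_tag ds (pvFlush w toks) (fun es hes t => ih es (by omega) t)]
            rw [pvFlush_eq]
            simp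
          · have hstep : pvStepB (false, w, toks) d = (false, [], pvFlush w toks) := by
              simp [pvStepB, hd, pvAlnumB_eq, hdw]
            rw [List.foldl_cons, hstep]
            rw [ih ds (by omega) (pvFlush w toks)]
            rw [pvFlush_eq]
            simp [hd]

-- ===== VERDICT =====
theorem parse_spec : Claim_equal_parse := by
  intro text _
  unfold Spec_parse parse
  have h := pvMain text.toList.length text.toList (le_refl _) []
  simpa [parse_alt, pvFinishB] using h.symm
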